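-- pv_equiv track=rewrite | github.com/Navoneel-1311/Particular_stuff | IR Project/Experiment_7(1).py | prepare_listwise_training_data
-- ===== SOURCE A (Python) =====
-- def prepare_listwise_training_data(indexed_data, queries, relevance_judgments):
--     train_data = []
--     for query_id, query_text in queries.items():
--         relevant_docs = relevance_judgments.get(query_id, {})
--         doc_infos = [(doc_id, doc_info) for doc_id, doc_info in indexed_data.items() if doc_id in relevant_docs]
--         doc_infos.sort(key=lambda x: relevant_docs.get(x[0], 0), reverse=True)
--         train_data.append((query_text, [doc_info[1].get("abstract", "") for doc_info in doc_infos]))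
--     return train_data
-- ===== SOURCE B (Python) =====
-- def prepare_listwise_training_data(indexed_data, queries, relevance_judgments):
--     # One-time position/abstract index over the documents; per query only the
--     # relevant docs are touched, ordered by (-relevance, document position),
--     # which reproduces the stable relevance-descending sort over indexed_data.
--     doc_index = {doc_id: (pos, info.get("abstract", ""))
--                  for pos, (doc_id, info) in enumerate(indexed_data.items())}
--     train_data = []
--     for query_id, query_text in queries.items():
--         relevant_docs = relevance_judgments.get(query_id, {})
--         hits = [(doc_id, rel) for doc_id, rel in relevant_docs.items() if doc_id in doc_index]
--         hits.sort(key=lambda p: doc_index[p[0]][0])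
--         hits.sort(key=lambda p: -p[1])
--         train_data.append((query_text, [doc_index[doc_id][1] for doc_id, _ in hits]))
--     return train_data
-- ===== Notes on version B (the rewrite author's own statement) =====
-- stated objective: faster
-- what changed: Instead of scanning and sorting the whole document collection for every query, B builds a doc_id -> (position, abstract) index once and per query touches only that query's relevant docs, sorting them by position then stably by -relevance (equivalent to the stable relevance-descending sort over the collection).
import Mathlib
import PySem

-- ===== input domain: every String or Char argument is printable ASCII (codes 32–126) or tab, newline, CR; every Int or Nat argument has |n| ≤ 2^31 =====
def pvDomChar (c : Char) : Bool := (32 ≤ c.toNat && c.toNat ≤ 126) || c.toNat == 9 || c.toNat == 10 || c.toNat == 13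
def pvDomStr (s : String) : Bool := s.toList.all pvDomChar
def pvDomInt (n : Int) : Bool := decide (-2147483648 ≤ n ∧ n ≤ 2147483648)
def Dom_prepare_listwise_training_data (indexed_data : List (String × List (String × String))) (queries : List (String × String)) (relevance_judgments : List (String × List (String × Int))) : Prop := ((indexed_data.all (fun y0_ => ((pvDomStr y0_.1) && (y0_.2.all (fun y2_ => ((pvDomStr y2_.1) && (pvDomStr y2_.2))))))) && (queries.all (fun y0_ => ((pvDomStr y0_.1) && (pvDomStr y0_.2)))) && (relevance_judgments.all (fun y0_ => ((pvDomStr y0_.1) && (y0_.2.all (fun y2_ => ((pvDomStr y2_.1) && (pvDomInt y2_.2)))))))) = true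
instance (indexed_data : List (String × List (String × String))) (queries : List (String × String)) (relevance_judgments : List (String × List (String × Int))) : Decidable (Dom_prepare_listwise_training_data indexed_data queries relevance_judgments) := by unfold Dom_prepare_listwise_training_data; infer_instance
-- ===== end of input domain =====

-- B is a faster re-implementation: one document index built up front, per query only the
-- relevant docs are sorted (by position, then stably by -relevance); equality of return
-- values with A is proved on the whole domain.

-- ===== PORT A =====
def prepare_listwise_training_data (indexed_data : List (String × List (String × String))) (queries : List (String × String)) (relevance_judgments : List (String × List (String × Int))) : List (String × List String) :=
  let idxD : PySem.Dict String (List (String × String)) := PySem.Dict.ofList indexed_data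
  let rjD : PySem.Dict String (List (String × Int)) := PySem.Dict.ofList relevance_judgments
  (PySem.Dict.ofList queries).items.foldl (fun train_data q =>
    let relevant_docs : PySem.Dict String Int := PySem.Dict.ofList (rjD.getD q.1 [])
    let doc_infos := idxD.items.filter (fun p => relevant_docs.contains p.1)
    let doc_infos2 := PySem.List.sorted doc_infos (fun x => relevant_docs.getD x.1 0) true
    train_data ++ [(q.2, doc_infos2.map (fun p => (PySem.Dict.ofList p.2).getD "abstract" ""))]) []

-- ===== PORT B =====
-- B-side helper: the doc_id -> (position, abstract) dict comprehension of Source B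
def pvDocIndex (indexed_data : List (String × List (String × String))) : PySem.Dict String (Int × String) :=
  (PySem.List.enumerate (PySem.Dict.ofList indexed_data).items).foldl
    (fun d e => d.insert e.2.1 (e.1, (PySem.Dict.ofList e.2.2).getD "abstract" "")) PySem.Dict.empty

def prepare_listwise_training_data_alt (indexed_data : List (String × List (String × String))) (queries : List (String × String)) (relevance_judgments : List (String × List (String × Int))) : List (String × List String) :=
  let doc_index := pvDocIndex indexed_data
  let rjD : PySem.Dict String (List (String × Int)) := PySem.Dict.ofList relevance_judgments
  (PySem.Dict.ofList queries).items.foldl (fun train_data q =>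
    let relevant_docs : PySem.Dict String Int := PySem.Dict.ofList (rjD.getD q.1 [])
    let hits := relevant_docs.items.filter (fun p => doc_index.contains p.1)
    let hits2 := PySem.List.sorted hits (fun p => (doc_index.getD p.1 (0, "")).1) false
    let hits3 := PySem.List.sorted hits2 (fun p => -p.2) false
    train_data ++ [(q.2, hits3.map (fun p => (doc_index.getD p.1 (0, "")).2))]) []

-- ===== PRECONDITION & SPEC =====
def Spec_prepare_listwise_training_data (indexed_data : List (String × List (String × String))) (queries : List (String × String)) (relevance_judgments : List (String × List (String × Int))) (out : List (String × List String)) : Prop := out = prepare_listwise_training_data_alt indexed_data queries relevance_judgments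
instance (indexed_data : List (String × List (String × String))) (queries : List (String × String)) (relevance_judgments : List (String × List (String × Int))) (out : List (String × List String)) : Decidable (Spec_prepare_listwise_training_data indexed_data queries relevance_judgments out) := by unfold Spec_prepare_listwise_training_data; infer_instance

-- ===== CLAIM (what is proved, stated in full; the proofs are below) =====
def Claim_equal_prepare_listwise_training_data : Prop := ∀ (indexed_data : List (String × List (String × String))) (queries : List (String × String)) (relevance_judgments : List (String × List (String × Int))), Dom_prepare_listwise_training_data indexed_data queries relevance_judgments → Spec_prepare_listwise_training_data indexed_data queries relevance_judgments (prepare_listwise_training_data indexed_data queries relevance_judgments)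

-- ===== LEMMAS AND PROOFS =====

-- The lexicographic relation "smaller key, or equal key and earlier position".
def pvLex {α : Type} (key pos : α → Int) (a b : α) : Prop :=
  key a < key b ∨ (key a = key b ∧ pos a < pos b)

-- Inserting x (whose position is after everything in acc) keeps the lex order.
lemma pv_insertBy_pairwise {α : Type} (key pos : α → Int) (x : α) (acc : List α)
    (hacc : acc.Pairwise (pvLex key pos)) (hpos : ∀ z ∈ acc, pos z < pos x) :
    (PySem.List.insertBy (fun a b => decide (key a < key b)) x acc).Pairwise (pvLex key pos) := by
  induction acc with
  | nil => simp [PySem.List.insertBy]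
  | cons y ys ih =>
    rw [List.pairwise_cons] at hacc
    obtain ⟨hy, hys⟩ := hacc
    by_cases hxy : key x < key y
    · simp only [PySem.List.insertBy, hxy, decide_true, if_true]
      refine List.pairwise_cons.mpr ⟨?_, List.pairwise_cons.mpr ⟨hy, hys⟩⟩
      intro s hs
      rcases List.mem_cons.mp hs with hs | hs
      · subst hs; exact Or.inl hxy
      · rcases hy s hs with h | h
        · exact Or.inl (lt_trans hxy h)
        · exact Or.inl (by omega)
    · simp only [PySem.List.insertBy, hxy, decide_false, if_false, Bool.false_eq_true]
      refine List.pairwise_cons.mpr ⟨?_, ih hys (fun z hz => hpos z (List.mem_cons_of_mem _ hz))⟩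
      intro s hs
      rcases (PySem.List.mem_insertBy _ _ _ _).mp hs with hs | hs
      · subst hs
        rcases lt_or_eq_of_le (not_lt.mp hxy) with h | h
        · exact Or.inl h
        · exact Or.inr ⟨h, hpos y (List.mem_cons_self)⟩
      · exact hy s hs

-- Stable insertion sort of a position-increasing list is pairwise lex-ordered.
lemma pv_foldl_insertBy_pairwise {α : Type} (key pos : α → Int) (xs : List α) :
    ∀ (acc : List α), acc.Pairwise (pvLex key pos) →
    xs.Pairwise (fun a b => pos a < pos b) →
    (∀ a ∈ acc, ∀ b ∈ xs, pos a < pos b) →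
    (xs.foldl (fun acc x => PySem.List.insertBy (fun a b => decide (key a < key b)) x acc) acc).Pairwise (pvLex key pos) := by
  induction xs with
  | nil => intro acc hacc _ _; exact hacc
  | cons x t ih =>
    intro acc hacc hxs hcross
    rw [List.pairwise_cons] at hxs
    simp only [List.foldl_cons]
    apply ih
    · exact pv_insertBy_pairwise key pos x acc hacc (fun z hz => hcross z hz x List.mem_cons_self)
    · exact hxs.2
    · intro a ha b hb
      rcases (PySem.List.mem_insertBy _ _ _ _).mp ha with h | h
      · subst h; exact hxs.1 b hb
      · exact hcross a h b (List.mem_cons_of_mem _ hb)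

lemma pv_sorted_pairwise_stable {α : Type} (key pos : α → Int) (xs : List α)
    (hxs : xs.Pairwise (fun a b => pos a < pos b)) :
    (PySem.List.sorted xs key false).Pairwise (pvLex key pos) := by
  rw [PySem.List.sorted_eq_foldl_insertBy]
  exact pv_foldl_insertBy_pairwise key pos xs [] List.Pairwise.nil hxs (by simp)

lemma pv_sorted_rev_pairwise_stable {α : Type} (key pos : α → Int) (xs : List α)
    (hxs : xs.Pairwise (fun a b => pos a < pos b)) :
    (PySem.List.sorted xs key true).Pairwise (pvLex (fun a => -key a) pos) := by
  rw [PySem.List.sorted_rev_eq_foldl_insertBy]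
  have hfun : (fun (a b : α) => decide (key b < key a)) = (fun a b => decide ((-key a) < (-key b))) := by
    funext a b; exact decide_eq_decide.mpr (by omega)
  rw [hfun]
  exact pv_foldl_insertBy_pairwise (fun a => -key a) pos xs [] List.Pairwise.nil hxs (by simp)

-- Two strictly-ordered permutations of each other are equal.
lemma pv_eq_of_perm_pairwise {α : Type} [DecidableEq α] (S : α → α → Prop)
    (hasym : ∀ a b, S a b → S b a → False) :
    ∀ (l₁ l₂ : List α), l₁.Perm l₂ → l₁.Pairwise S → l₂.Pairwise S → l₁ = l₂ := by
  intro l₁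
  induction l₁ with
  | nil => intro l₂ hp _ _; exact (List.Perm.nil_eq hp).symm ▸ rfl
  | cons a t₁ ih =>
    intro l₂ hp h₁ h₂
    cases l₂ with
    | nil => exact absurd hp.symm (by simp)
    | cons b t₂ =>
      rw [List.pairwise_cons] at h₁ h₂
      have hab : a = b := by
        by_contra hne
        have ha2 : a ∈ b :: t₂ := hp.mem_iff.mp List.mem_cons_self
        have hat2 : a ∈ t₂ := by
          rcases List.mem_cons.mp ha2 with h | h
          · exact absurd h hne
          · exact h
        have hb1 : b ∈ a :: t₁ := hp.symm.mem_iff.mp List.mem_cons_self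
        have hbt1 : b ∈ t₁ := by
          rcases List.mem_cons.mp hb1 with h | h
          · exact absurd h.symm hne
          · exact h
        exact hasym a b (h₁.1 b hbt1) (h₂.1 a hat2)
      subst hab
      have := ih t₂ hp.cons_inv h₁.2 h₂.2
      rw [this]

-- A Nodup list is pairwise increasing in idxOf.
lemma pv_nodup_pairwise_idxOf (ks : List String) (h : ks.Nodup) :
    ks.Pairwise (fun a b => ks.idxOf a < ks.idxOf b) := by
  induction ks with
  | nil => exact List.Pairwise.nil
  | cons a t ih =>
    rw [List.nodup_cons] at h
    refine List.pairwise_cons.mpr ⟨?_, ?_⟩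
    · intro b hb
      have hba : a ≠ b := fun he => h.1 (he ▸ hb)
      rw [List.idxOf_cons_self, List.idxOf_cons_ne t hba]
      omega
    · refine (ih h.2).imp_of_mem ?_
      intro x y hx hy hxy
      have hax : a ≠ x := fun he => h.1 (he ▸ hx)
      have hay : a ≠ y := fun he => h.1 (he ▸ hy)
      rw [List.idxOf_cons_ne t hax, List.idxOf_cons_ne t hay]
      omega

-- Folding inserts over keys all different from k leaves get? k unchanged.
lemma pv_get?_foldl_insert_not_mem {γ β : Type} (keyf : β → String) (valf : β → γ) :
    ∀ (l : List β) (d : PySem.Dict String γ) (k : String), (∀ e ∈ l, keyf e ≠ k) →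
    (l.foldl (fun d e => d.insert (keyf e) (valf e)) d).get? k = d.get? k := by
  intro l
  induction l with
  | nil => intro d k _; rfl
  | cons e t ih =>
    intro d k hk
    simp only [List.foldl_cons]
    rw [ih _ k (fun e' he' => hk e' (List.mem_cons_of_mem _ he'))]
    exact PySem.Dict.get?_insert_of_ne d _ (fun he => hk e List.mem_cons_self he.symm)

-- map of a filter-on-first-component
lemma pv_map_fst_filter {α β : Type} (p : α → Bool) :
    ∀ (l : List (α × β)), (l.filter (fun x => p x.1)).map Prod.fst = (l.map Prod.fst).filter p := by
  intro l
  induction l with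
  | nil => rfl
  | cons a t ih =>
    by_cases h : p a.1
    · simp [h, ih]
    · simp [h, ih]

-- Generic lookup after folding inserts over an enumerated association list with distinct keys.
lemma pv_enum_fold_get? :
    ∀ (its : List (String × List (String × String))) (d : PySem.Dict String (Int × String)) (s : Int)
      (k : String) (v : List (String × String)),
    (its.map Prod.fst).Nodup → (k, v) ∈ its →
    ((PySem.List.enumerate its s).foldl
        (fun d e => d.insert e.2.1 (e.1, (PySem.Dict.ofList e.2.2).getD "abstract" "")) d).get? k
      = some (s + ((its.map Prod.fst).idxOf k : Int), (PySem.Dict.ofList v).getD "abstract" "") := by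
  intro its
  induction its with
  | nil => intro d s k v _ hm; exact absurd hm (List.not_mem_nil)
  | cons p ts ih =>
    intro d s k v hnd hm
    rw [List.map_cons, List.nodup_cons] at hnd
    rw [PySem.List.enumerate_cons, List.foldl_cons]
    by_cases hpk : p.1 = k
    · have hkv : (k, v) = p := by
        rcases List.mem_cons.mp hm with h | h
        · exact h
        · exact absurd (hpk ▸ List.mem_map_of_mem (f := Prod.fst) h) hnd.1
      have hnotin : ∀ e ∈ PySem.List.enumerate ts (s + 1), (fun e => e.2.1) e ≠ k := by
        intro e he hek
        rcases (PySem.List.mem_enumerate_iff ts (s + 1) e).mp he with ⟨j, hj, hej⟩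
        have : e.2 ∈ ts := by rw [hej]; exact List.getElem_mem hj
        exact hnd.1 (hpk ▸ hek ▸ List.mem_map_of_mem (f := Prod.fst) this)
      rw [pv_get?_foldl_insert_not_mem (fun (e : Int × (String × List (String × String))) => e.2.1)
            (fun (e : Int × (String × List (String × String))) =>
              (e.1, (PySem.Dict.ofList e.2.2).getD "abstract" "")) _ _ k hnotin]
      have hv : v = p.2 := congrArg Prod.snd hkv
      subst hpk
      simp [PySem.Dict.get?_insert_self, List.idxOf_cons_self, hv]
    · have hmt : (k, v) ∈ ts := by
        rcases List.mem_cons.mp hm with h | h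
        · exact absurd (congrArg Prod.fst h.symm) hpk
        · exact h
      rw [ih _ (s + 1) k v hnd.2 hmt, List.map_cons, List.idxOf_cons_ne _ hpk]
      congr 2
      push_cast [Nat.succ_eq_add_one]
      ring

-- Lookup in the doc index: position = idxOf in the keys, value = stored abstract.
lemma pv_docIndex_get? (indexed_data : List (String × List (String × String))) (k : String)
    (hk : k ∈ (PySem.Dict.ofList indexed_data).keys) :
    (pvDocIndex indexed_data).get? k =
      some (((PySem.Dict.ofList indexed_data).keys.idxOf k : Int),
        (PySem.Dict.ofList ((PySem.Dict.ofList indexed_data).getD k [])).getD "abstract" "") := by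
  have hnd : ((PySem.Dict.ofList indexed_data).items.map Prod.fst).Nodup :=
    PySem.Dict.nodup_keys_ofList indexed_data
  rcases List.mem_map.mp (hk :
      k ∈ (PySem.Dict.ofList indexed_data).items.map Prod.fst) with ⟨pr, hpr, hprk⟩
  have hmem : (k, pr.2) ∈ (PySem.Dict.ofList indexed_data).items := by
    rw [← hprk]; exact hpr
  have hgd : (PySem.Dict.ofList indexed_data).getD k [] = pr.2 :=
    PySem.Dict.getD_of_mem_items _ hmem (PySem.Dict.nodup_keys_ofList indexed_data) []
  unfold pvDocIndex
  rw [pv_enum_fold_get? _ _ 0 k pr.2 hnd hmem, hgd]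
  norm_num
  rfl

lemma pv_docIndex_keys (indexed_data : List (String × List (String × String))) :
    (pvDocIndex indexed_data).keys = (PySem.Dict.ofList indexed_data).keys := by
  unfold pvDocIndex
  rw [PySem.Dict.keys_foldl_insert_key _ (fun (e : Int × (String × List (String × String))) => e.2.1)
        (fun _ (e : Int × (String × List (String × String))) =>
          (e.1, (PySem.Dict.ofList e.2.2).getD "abstract" "")),
      PySem.Dict.keys_empty, PySem.Set.update_nil_left]
  have h2 : (PySem.List.enumerate (PySem.Dict.ofList indexed_data).items 0).map (fun e => e.2.1)
      = (PySem.Dict.ofList indexed_data).keys := by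
    rw [show (fun (e : Int × (String × List (String × String))) => e.2.1)
          = Prod.fst ∘ Prod.snd from rfl, ← List.map_map,
        PySem.List.map_snd_enumerate]
    rfl
  rw [h2]
  exact PySem.Set.ofList_eq_self_of_nodup _ (PySem.Dict.nodup_keys_ofList indexed_data)

-- The heart of the proof: for one query, A's filter + stable relevance-descending sort over
-- the document dict equals B's position-sort + stable (-relevance)-sort over the judgment dict.
lemma pv_core (dd : PySem.Dict String (List (String × String))) (rd : PySem.Dict String Int)
    (DI : PySem.Dict String (Int × String))
    (hdk : dd.keys.Nodup) (hrk : rd.keys.Nodup) (hDIk : DI.keys = dd.keys)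
    (hDIget : ∀ k ∈ dd.keys, DI.get? k =
      some ((dd.keys.idxOf k : Int), (PySem.Dict.ofList (dd.getD k [])).getD "abstract" "")) :
    (PySem.List.sorted (dd.items.filter (fun p => rd.contains p.1))
        (fun x => rd.getD x.1 0) true).map
      (fun p => (PySem.Dict.ofList p.2).getD "abstract" "")
    =
    (PySem.List.sorted
        (PySem.List.sorted (rd.items.filter (fun p => DI.contains p.1))
          (fun p => (DI.getD p.1 (0, "")).1) false)
        (fun p => -p.2) false).map
      (fun p => (DI.getD p.1 (0, "")).2) := by
  set L := dd.items.filter (fun p => rd.contains p.1) with hL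
  set SA := PySem.List.sorted L (fun x => rd.getD x.1 0) true with hSAdef
  set M := rd.items.filter (fun p => DI.contains p.1) with hM
  set S1 := PySem.List.sorted M (fun p => (DI.getD p.1 (0, "")).1) false with hS1def
  set SB := PySem.List.sorted S1 (fun p => -p.2) false with hSBdef
  have hkeys_eq : dd.items.map Prod.fst = dd.keys := rfl
  have hSAsub : ∀ p ∈ SA, p ∈ dd.items := by
    intro p hp
    exact (List.mem_filter.mp ((PySem.List.mem_sorted _ _ _ _).mp hp)).1
  have hSAgd : ∀ p ∈ SA, dd.getD p.1 [] = p.2 := by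
    intro p hp
    rcases hp' : p with ⟨a, b⟩
    exact PySem.Dict.getD_of_mem_items dd (hp' ▸ hSAsub p hp) hdk []
  have hMmem : ∀ p ∈ M, p ∈ rd.items ∧ p.1 ∈ dd.keys := by
    intro p hp
    rcases List.mem_filter.mp hp with ⟨h1, h2⟩
    refine ⟨h1, ?_⟩
    have h3 := (PySem.Dict.contains_iff_mem_keys DI p.1).mp h2
    rwa [hDIk] at h3
  have hMget : ∀ p ∈ M, DI.getD p.1 (0, "") =
      ((dd.keys.idxOf p.1 : Int), (PySem.Dict.ofList (dd.getD p.1 [])).getD "abstract" "") := by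
    intro p hp
    rw [PySem.Dict.getD_eq_get?_getD, hDIget p.1 (hMmem p hp).2]
    rfl
  -- A side: pairwise lex order of the stable reverse sort
  have hks_pair : dd.keys.Pairwise
      (fun a b => (dd.keys.idxOf a : Int) < (dd.keys.idxOf b : Int)) := by
    refine (pv_nodup_pairwise_idxOf dd.keys hdk).imp ?_
    intro a b h
    exact_mod_cast h
  have hitems_pair : dd.items.Pairwise
      (fun p q => (dd.keys.idxOf p.1 : Int) < (dd.keys.idxOf q.1 : Int)) := by
    have h' := hks_pair
    rw [← hkeys_eq] at h'
    exact (List.pairwise_map (f := Prod.fst)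
      (R := fun a b => (dd.keys.idxOf a : Int) < (dd.keys.idxOf b : Int))
      (l := dd.items)).mp h'
  have hLpos : L.Pairwise
      (fun p q => (dd.keys.idxOf p.1 : Int) < (dd.keys.idxOf q.1 : Int)) :=
    hitems_pair.filter _
  have hSA : SA.Pairwise
      (pvLex (fun p => -(rd.getD p.1 0)) (fun p => (dd.keys.idxOf p.1 : Int))) := by
    rw [hSAdef]
    exact pv_sorted_rev_pairwise_stable (fun p => rd.getD p.1 0)
      (fun p => (dd.keys.idxOf p.1 : Int)) L hLpos
  have hSA' : (SA.map Prod.fst).Pairwise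
      (pvLex (fun k => -(rd.getD k 0)) (fun k => (dd.keys.idxOf k : Int))) := by
    refine List.pairwise_map.mpr (hSA.imp ?_)
    intro p q h
    exact h
  -- B side
  have hS1memM : ∀ p ∈ S1, p ∈ M := by
    intro p hp
    exact (PySem.List.mem_sorted _ _ _ _).mp hp
  have hMfst : M.map Prod.fst = rd.keys.filter (fun k => DI.contains k) := by
    rw [hM]
    exact pv_map_fst_filter (fun k => DI.contains k) rd.items
  have hMfst_nodup : (M.map Prod.fst).Nodup := by
    rw [hMfst]
    exact hrk.filter _
  have hS1fst_nodup : (S1.map Prod.fst).Nodup := by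
    have hperm : (S1.map Prod.fst).Perm (M.map Prod.fst) :=
      (PySem.List.sorted_perm M _ false).map Prod.fst
    exact hperm.nodup_iff.mpr hMfst_nodup
  have hS1ne : S1.Pairwise (fun p q => p.1 ≠ q.1) :=
    List.pairwise_map.mp (List.nodup_iff_pairwise_ne.mp hS1fst_nodup)
  have hS1le : S1.Pairwise
      (fun p q => (DI.getD p.1 (0, "")).1 ≤ (DI.getD q.1 (0, "")).1) := by
    rw [hS1def]
    exact PySem.List.sorted_pairwise M _
  have hS1pos : S1.Pairwise
      (fun p q => (dd.keys.idxOf p.1 : Int) < (dd.keys.idxOf q.1 : Int)) := by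
    refine (hS1le.and hS1ne).imp_of_mem ?_
    rintro p q hp hq ⟨hle, hne⟩
    have hpM := hS1memM p hp
    have hqM := hS1memM q hq
    have hp1 := (hMmem p hpM).2
    rw [hMget p hpM, hMget q hqM] at hle
    simp only at hle
    have hne' : dd.keys.idxOf p.1 ≠ dd.keys.idxOf q.1 :=
      fun h => hne ((List.idxOf_inj hp1).mp h)
    omega
  have hSB : SB.Pairwise
      (pvLex (fun p => -p.2) (fun p => (dd.keys.idxOf p.1 : Int))) := by
    rw [hSBdef]
    exact pv_sorted_pairwise_stable (fun p => -p.2) _ S1 hS1pos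
  have hSBmemM : ∀ p ∈ SB, p ∈ M := by
    intro p hp
    exact hS1memM p ((PySem.List.mem_sorted _ _ _ _).mp hp)
  have hrdget : ∀ p ∈ M, rd.getD p.1 0 = p.2 := by
    intro p hp
    rcases hp' : p with ⟨a, b⟩
    exact PySem.Dict.getD_of_mem_items rd (hp' ▸ (hMmem p hp).1) hrk 0
  have hSB' : (SB.map Prod.fst).Pairwise
      (pvLex (fun k => -(rd.getD k 0)) (fun k => (dd.keys.idxOf k : Int))) := by
    refine List.pairwise_map.mpr (hSB.imp_of_mem ?_)
    intro p q hp hq h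
    have e1 : rd.getD p.1 0 = p.2 := hrdget p (hSBmemM p hp)
    have e2 : rd.getD q.1 0 = q.2 := hrdget q (hSBmemM q hq)
    unfold pvLex at h ⊢
    rcases h with h | ⟨h1, h2⟩
    · exact Or.inl (by simpa [e1, e2] using h)
    · exact Or.inr ⟨by simpa [e1, e2] using h1, by simpa using h2⟩
  -- the two key sequences are permutations of each other
  have hpermA : (SA.map Prod.fst).Perm (dd.keys.filter (fun k => rd.contains k)) := by
    have h1 : (SA.map Prod.fst).Perm (L.map Prod.fst) :=
      (PySem.List.sorted_perm L _ true).map Prod.fst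
    have h2 : L.map Prod.fst = dd.keys.filter (fun k => rd.contains k) := by
      rw [hL]
      exact pv_map_fst_filter (fun k => rd.contains k) dd.items
    rwa [h2] at h1
  have hpermB : (SB.map Prod.fst).Perm (rd.keys.filter (fun k => DI.contains k)) := by
    have h1 : (SB.map Prod.fst).Perm (S1.map Prod.fst) :=
      (PySem.List.sorted_perm S1 _ false).map Prod.fst
    have h2 : (S1.map Prod.fst).Perm (M.map Prod.fst) :=
      (PySem.List.sorted_perm M _ false).map Prod.fst
    have h3 := h1.trans h2
    rwa [hMfst] at h3
  have hpermAB : (SA.map Prod.fst).Perm (SB.map Prod.fst) := by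
    refine hpermA.trans (List.Perm.trans (l₂ := rd.keys.filter (fun k => DI.contains k)) ?_ hpermB.symm)
    refine (List.perm_ext_iff_of_nodup (hdk.filter _) (hrk.filter _)).mpr ?_
    intro k
    simp only [List.mem_filter]
    constructor
    · rintro ⟨h1, h2⟩
      exact ⟨(PySem.Dict.contains_iff_mem_keys rd k).mp h2,
        (PySem.Dict.contains_iff_mem_keys DI k).mpr (hDIk ▸ h1)⟩
    · rintro ⟨h1, h2⟩
      have h3 := (PySem.Dict.contains_iff_mem_keys DI k).mp h2
      rw [hDIk] at h3
      exact ⟨h3, (PySem.Dict.contains_iff_mem_keys rd k).mpr h1⟩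
  have heq : SA.map Prod.fst = SB.map Prod.fst := by
    refine pv_eq_of_perm_pairwise _ ?_ _ _ hpermAB hSA' hSB'
    intro a b h1 h2
    unfold pvLex at h1 h2
    omega
  calc SA.map (fun p => (PySem.Dict.ofList p.2).getD "abstract" "")
      = SA.map ((fun k => (PySem.Dict.ofList (dd.getD k [])).getD "abstract" "") ∘ Prod.fst) := by
        refine List.map_congr_left ?_
        intro p hp
        simp only [Function.comp]
        rw [hSAgd p hp]
    _ = (SA.map Prod.fst).map
          (fun k => (PySem.Dict.ofList (dd.getD k [])).getD "abstract" "") := by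
        rw [List.map_map]
    _ = (SB.map Prod.fst).map
          (fun k => (PySem.Dict.ofList (dd.getD k [])).getD "abstract" "") := by
        rw [heq]
    _ = SB.map ((fun k => (PySem.Dict.ofList (dd.getD k [])).getD "abstract" "") ∘ Prod.fst) := by
        rw [List.map_map]
    _ = SB.map (fun p => (DI.getD p.1 (0, "")).2) := by
        refine List.map_congr_left ?_
        intro p hp
        simp only [Function.comp]
        rw [hMget p (hSBmemM p hp)]

-- Per-query equality of the two pipelines.
lemma pv_per_query (indexed_data : List (String × List (String × String))) (rl : List (String × Int)) :
    (PySem.List.sorted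
        ((PySem.Dict.ofList indexed_data).items.filter (fun p => (PySem.Dict.ofList rl).contains p.1))
        (fun x => (PySem.Dict.ofList rl).getD x.1 0) true).map
      (fun p => (PySem.Dict.ofList p.2).getD "abstract" "")
    =
    (PySem.List.sorted
        (PySem.List.sorted
          ((PySem.Dict.ofList rl).items.filter (fun p => (pvDocIndex indexed_data).contains p.1))
          (fun p => ((pvDocIndex indexed_data).getD p.1 (0, "")).1) false)
        (fun p => -p.2) false).map
      (fun p => ((pvDocIndex indexed_data).getD p.1 (0, "")).2) :=
  pv_core (PySem.Dict.ofList indexed_data) (PySem.Dict.ofList rl) (pvDocIndex indexed_data)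
    (PySem.Dict.nodup_keys_ofList _) (PySem.Dict.nodup_keys_ofList _)
    (pv_docIndex_keys indexed_data)
    (fun k hk => pv_docIndex_get? indexed_data k hk)

-- ===== VERDICT (by name: the statement is the Claim_ definition above) =====
theorem prepare_listwise_training_data_spec : Claim_equal_prepare_listwise_training_data := by
  intro indexed_data queries relevance_judgments _
  unfold Spec_prepare_listwise_training_data
  unfold prepare_listwise_training_data prepare_listwise_training_data_alt
  simp only [PySem.List.foldl_append_singleton_eq_map, List.nil_append]
  apply List.map_congr_left
  intro q _
  exact congrArg (Prod.mk q.2) (pv_per_query indexed_data ((PySem.Dict.ofList relevance_judgments).getD q.1 []))
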